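-- pv_equiv track=rewrite | github.com/ywlee-dot/unified | backend/app/projects/dataset_summary/core.py | _merge_headers
-- ===== SOURCE A (Python) =====
-- from typing import Any, Dict, List
--
-- def _fill_forward(headers: List[str]) -> List[str]:
--     filled = []
--     last = ""
--     for value in headers:
--         if value:
--             last = value
--             filled.append(value)
--         else:
--             filled.append(last)
--     return filled
--
-- def _merge_headers(row1: tuple, row2: tuple) -> List[str]:
--     headers = []
--     row1_list = [str(h).strip() if h is not None else "" for h in row1]
--     row2_list = [str(h).strip() if h is not None else "" for h in row2]
--     row1_list = _fill_forward(row1_list)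
--     for i in range(max(len(row1_list), len(row2_list))):
--         h1 = row1_list[i] if i < len(row1_list) else ""
--         h2 = row2_list[i] if i < len(row2_list) else ""
--         if h2 and h1:
--             headers.append(f"{h1} / {h2}")
--         elif h2:
--             headers.append(h2)
--         else:
--             headers.append(h1)
--     return headers
-- ===== SOURCE B (Python) =====
-- def _merge_headers(row1, row2):
--     def norm(h):
--         return str(h).strip() if h is not None else ""
--     vals = [norm(h) for h in row1]
--     n1 = len(vals)
--     # positions of the non-empty row1 headers; each one spans up to the next mark
--     marks = [i for i, v in enumerate(vals) if v]
--     filled = [""] * (marks[0] if marks else n1)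
--     for p, q in zip(marks, marks[1:] + [n1]):
--         filled += [vals[p]] * (q - p)
--     m = max(n1, len(row2))
--     filled += [""] * (m - n1)
--     col2 = [norm(h) for h in row2] + [""] * (m - len(row2))
--     return [f"{a} / {b}" if a and b else (b or a) for a, b in zip(filled, col2)]
-- ===== Notes on version B (the rewrite author's own statement) =====
-- stated objective: alternative
-- what changed: Instead of A's element-wise fill-forward carry over row1 followed by an index loop with bounds checks, B first computes the positions of the non-empty row1 headers and run-length-expands each header over its span via list multiplication, then pads both rows to equal length and merges them with a single zip comprehension.
import Mathlib
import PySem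

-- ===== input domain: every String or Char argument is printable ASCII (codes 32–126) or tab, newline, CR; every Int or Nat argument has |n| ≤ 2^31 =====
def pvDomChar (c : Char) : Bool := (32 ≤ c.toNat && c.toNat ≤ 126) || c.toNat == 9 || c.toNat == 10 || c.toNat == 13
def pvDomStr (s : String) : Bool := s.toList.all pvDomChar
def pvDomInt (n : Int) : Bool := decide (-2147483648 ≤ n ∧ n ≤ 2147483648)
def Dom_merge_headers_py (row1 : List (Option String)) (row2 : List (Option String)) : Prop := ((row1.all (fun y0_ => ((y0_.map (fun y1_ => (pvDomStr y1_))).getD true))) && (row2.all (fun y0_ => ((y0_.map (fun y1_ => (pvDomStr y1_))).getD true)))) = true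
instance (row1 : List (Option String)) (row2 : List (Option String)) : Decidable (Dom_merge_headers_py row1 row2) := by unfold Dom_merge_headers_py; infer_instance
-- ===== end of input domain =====

-- B replaces A's element-wise fill-forward carry by a run-length expansion over the positions of the
-- non-empty row1 headers, then pads both rows to equal length and merges with a zip (objective: alternative, same O(n)).

-- `str(h).strip() if h is not None else ""` (appears verbatim in both Pythons)
def pvNorm (h : Option String) : String :=
  match h with
  | some s => PySem.Str.strip s
  | none => ""

-- ===== PORT A =====
-- A's combine: `f"{h1} / {h2}"` if both truthy, elif h2 then h2, else h1
def pvCombine (h1 h2 : String) : String :=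
  if h2 ≠ "" ∧ h1 ≠ "" then h1 ++ " / " ++ h2 else if h2 ≠ "" then h2 else h1

-- `_fill_forward`: loop with `filled` accumulator and `last` carry
def fill_forward_py (headers : List String) : List String :=
  (headers.foldl
    (fun (st : List String × String) value =>
      if value ≠ "" then (st.1 ++ [value], value) else (st.1 ++ [st.2], st.2))
    ([], "")).1

def merge_headers_py (row1 : List (Option String)) (row2 : List (Option String)) : List String :=
  let row1_list := fill_forward_py (row1.map pvNorm)
  let row2_list := row2.map pvNorm
  (List.range (max row1_list.length row2_list.length)).foldl
    (fun headers i =>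
      let h1 := row1_list.getD i ""   -- row1_list[i] if i < len(row1_list) else ""
      let h2 := row2_list.getD i ""
      headers ++ [pvCombine h1 h2])
    []

-- ===== PORT B =====
-- B's combine: `f"{a} / {b}" if a and b else (b or a)`
def bCombine (a b : String) : String :=
  if a ≠ "" ∧ b ≠ "" then a ++ " / " ++ b else if b ≠ "" then b else a

def merge_headers_py_alt (row1 : List (Option String)) (row2 : List (Option String)) : List String :=
  let vals := row1.map pvNorm
  let n1 := vals.length
  -- `marks = [i for i, v in enumerate(vals) if v]`
  let marks : List Int := ((PySem.List.enumerate vals 0).filter (fun p => p.2 ≠ "")).map Prod.fst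
  -- `filled = [""] * (marks[0] if marks else n1)`
  let filled0 := List.replicate (match marks with | [] => (n1 : Int) | p :: _ => p).toNat ("" : String)
  -- `for p, q in zip(marks, marks[1:] + [n1]): filled += [vals[p]] * (q - p)`
  -- (vals[p] is in range by construction of marks, hence pyGetD)
  let filled := (marks.zip (PySem.List.slice marks (some 1) none ++ [(n1 : Int)])).foldl
    (fun filled pq => filled ++ List.replicate (pq.2 - pq.1).toNat (PySem.List.pyGetD vals pq.1 "")) filled0
  let m := max n1 row2.length
  let filled2 := filled ++ List.replicate (m - n1) ""
  let col2 := row2.map pvNorm ++ List.replicate (m - row2.length) ""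
  (filled2.zip col2).map (fun ab => bCombine ab.1 ab.2)

-- ===== PRECONDITION & SPEC =====
def Spec_merge_headers_py (row1 : List (Option String)) (row2 : List (Option String)) (out : List String) : Prop := out = merge_headers_py_alt row1 row2
instance (row1 : List (Option String)) (row2 : List (Option String)) (out : List String) : Decidable (Spec_merge_headers_py row1 row2 out) := by unfold Spec_merge_headers_py; infer_instance

-- ===== CLAIM (what is proved, stated in full; the proofs are below) =====
def Claim_equal_merge_headers_py : Prop := ∀ (row1 : List (Option String)) (row2 : List (Option String)), Dom_merge_headers_py row1 row2 → Spec_merge_headers_py row1 row2 (merge_headers_py row1 row2)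

-- ===== LEMMAS AND PROOFS =====

lemma combine_eq (a b : String) : bCombine a b = pvCombine a b := by
  unfold bCombine pvCombine
  by_cases ha : a = "" <;> by_cases hb : b = "" <;> simp [ha, hb]

-- recursive characterisation of `_fill_forward` with explicit carry
def ffRec (last : String) : List String → List String
  | [] => []
  | v :: vs => if v ≠ "" then v :: ffRec v vs else last :: ffRec last vs

-- recursive characterisation of the position-wise merge
def mRec : List String → List String → List String
  | [], [] => []
  | [], y :: ys => pvCombine "" y :: mRec [] ys
  | x :: xs, [] => pvCombine x "" :: mRec xs []
  | x :: xs, y :: ys => pvCombine x y :: mRec xs ys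

lemma ff_foldl (hs : List String) : ∀ (acc : List String) (last : String),
    (hs.foldl
      (fun (st : List String × String) value =>
        if value ≠ "" then (st.1 ++ [value], value) else (st.1 ++ [st.2], st.2))
      (acc, last)).1 = acc ++ ffRec last hs := by
  induction hs with
  | nil => intro acc last; simp [ffRec]
  | cons v vs ih =>
      intro acc last
      rw [List.foldl_cons]
      by_cases hv : v = ""
      · have : (if v ≠ "" then (acc ++ [v], v) else (acc ++ [last], last)) = (acc ++ [last], last) := by
          simp [hv]
        rw [this, ih, ffRec]
        simp [hv]
      · have : (if v ≠ "" then (acc ++ [v], v) else (acc ++ [last], last)) = (acc ++ [v], v) := by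
          simp [hv]
        rw [this, ih, ffRec]
        simp [hv]

lemma fill_forward_eq (hs : List String) : fill_forward_py hs = ffRec "" hs := by
  unfold fill_forward_py
  rw [ff_foldl]
  simp

lemma mRec_eq_map_range (a : List String) : ∀ b : List String,
    (List.range (max a.length b.length)).map
      (fun i => pvCombine (a.getD i "") (b.getD i "")) = mRec a b := by
  induction a with
  | nil =>
      intro b
      induction b with
      | nil => simp [mRec]
      | cons y ys ihb =>
          simp only [List.length_nil, List.length_cons, Nat.max_eq_right (Nat.zero_le _)] at *
          rw [List.range_succ_eq_map]
          simp [mRec, List.map_map, Function.comp_def, ← ihb]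
  | cons x xs ih =>
      intro b
      cases b with
      | nil =>
          simp only [List.length_cons, List.length_nil, Nat.max_eq_left (Nat.zero_le _)] at *
          rw [List.range_succ_eq_map]
          have := ih []
          simp only [List.length_nil, Nat.max_eq_left (Nat.zero_le _)] at this
          simp [mRec, List.map_map, Function.comp_def, ← this]
      | cons y ys =>
          have hm : max (x :: xs).length (y :: ys).length = max xs.length ys.length + 1 := by
            simp [Nat.succ_max_succ]
          rw [hm, List.range_succ_eq_map]
          simp [mRec, List.map_map, Function.comp_def, ← ih ys]

-- Nat-level picture of B's marks and run expansion
def marksN : List String → List Nat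
  | [] => []
  | v :: vs => if v ≠ "" then 0 :: (marksN vs).map (· + 1) else (marksN vs).map (· + 1)

def expandN (vals : List String) (n : Nat) (ms : List Nat) : List String :=
  (ms.zip (ms.drop 1 ++ [n])).flatMap (fun pq => List.replicate (pq.2 - pq.1) (vals.getD pq.1 ""))

lemma marksP_eq (vs : List String) : ∀ (s : Int),
    ((PySem.List.enumerate vs s).filter (fun p => p.2 ≠ "")).map Prod.fst
      = (marksN vs).map (fun (k : Nat) => s + (k : Int)) := by
  induction vs with
  | nil => intro s; simp [PySem.List.enumerate_nil, marksN]
  | cons v vs ih =>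
      intro s
      have hcomp : ((marksN vs).map (· + 1)).map (fun (k : Nat) => s + (k : Int))
          = (marksN vs).map (fun (k : Nat) => (s + 1) + (k : Int)) := by
        rw [List.map_map]
        refine List.map_congr_left ?_
        intro k _
        simp only [Function.comp_apply]
        push_cast
        ring
      rw [PySem.List.enumerate_cons]
      by_cases hv : v = ""
      · have hms : marksN (v :: vs) = (marksN vs).map (· + 1) := by simp [marksN, hv]
        rw [hms, hcomp, ← ih (s + 1)]
        simp [hv]
      · have hms : marksN (v :: vs) = 0 :: (marksN vs).map (· + 1) := by simp [marksN, hv]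
        rw [hms, List.map_cons, hcomp, ← ih (s + 1)]
        simp [hv]

lemma expandN_shift (x : String) (vs : List String) (n : Nat) (ms : List Nat) :
    expandN (x :: vs) (n + 1) (ms.map (· + 1)) = expandN vs n ms := by
  unfold expandN
  have hdrop : (ms.map (· + 1)).drop 1 ++ [n + 1] = (ms.drop 1 ++ [n]).map (· + 1) := by
    simp
  rw [hdrop, List.zip_map, List.flatMap_map]
  refine List.flatMap_congr ?_
  intro pq _
  simp [Prod.map, Nat.succ_sub_succ]

lemma length_ffRec (vs : List String) : ∀ last, (ffRec last vs).length = vs.length := by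
  induction vs with
  | nil => intro last; simp [ffRec]
  | cons v vs ih => intro last; by_cases hv : v = "" <;> simp [ffRec, hv, ih]

lemma fillG (vs : List String) : ∀ (last : String),
    List.replicate ((marksN vs).headD vs.length) last ++ expandN vs vs.length (marksN vs)
      = ffRec last vs := by
  induction vs with
  | nil => intro last; simp [marksN, expandN, ffRec]
  | cons v vs ih =>
      intro last
      by_cases hv : v = ""
      · have hms : marksN (v :: vs) = (marksN vs).map (· + 1) := by simp [marksN, hv]
        have hhead : ((marksN vs).map (· + 1)).headD (vs.length + 1)
            = (marksN vs).headD vs.length + 1 := by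
          cases marksN vs <;> simp
        rw [hms, show (v :: vs).length = vs.length + 1 from rfl, hhead,
          expandN_shift v vs vs.length (marksN vs), List.replicate_succ, List.cons_append,
          ih last]
        simp [ffRec, hv]
      · have hms : marksN (v :: vs) = 0 :: (marksN vs).map (· + 1) := by simp [marksN, hv]
        rw [hms]
        simp only [List.headD_cons, List.replicate_zero, List.nil_append]
        cases hms' : marksN vs with
        | nil =>
            have h2 := ih v
            rw [hms'] at h2
            simp [expandN] at h2
            simp [expandN, hv, List.replicate_succ, ffRec, h2]
        | cons q rest =>
            have h1 : expandN (v :: vs) (vs.length + 1) (0 :: (q :: rest).map (· + 1))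
                = List.replicate (q + 1) v
                  ++ expandN (v :: vs) (vs.length + 1) ((q :: rest).map (· + 1)) := by
              simp [expandN]
            rw [show (v :: vs).length = vs.length + 1 from rfl, h1,
              expandN_shift v vs vs.length (q :: rest)]
            have h2 := ih v
            rw [hms'] at h2
            simp only [List.headD_cons] at h2
            rw [List.replicate_succ, List.cons_append, h2]
            simp [ffRec, hv]

lemma zipPad (a : List String) : ∀ b : List String,
    ((a ++ List.replicate (max a.length b.length - a.length) "").zip
     (b ++ List.replicate (max a.length b.length - b.length) "")).map
      (fun ab => pvCombine ab.1 ab.2) = mRec a b := by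
  induction a with
  | nil =>
      intro b
      induction b with
      | nil => simp [mRec]
      | cons y ys ihb =>
          simp only [List.length_nil, List.length_cons, Nat.max_eq_right (Nat.zero_le _)] at *
          simp only [Nat.sub_zero, Nat.sub_self, List.replicate_zero, List.append_nil,
            List.nil_append] at *
          rw [List.replicate_succ]
          simp [mRec, ihb]
  | cons x xs ih =>
      intro b
      cases b with
      | nil =>
          have := ih []
          simp only [List.length_nil, Nat.max_eq_left (Nat.zero_le _), Nat.sub_self,
            List.replicate_zero, List.append_nil, Nat.sub_zero, List.nil_append,
            List.length_cons] at *
          rw [List.replicate_succ]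
          simp [mRec, this]
      | cons y ys =>
          have hm : max (x :: xs).length (y :: ys).length = max xs.length ys.length + 1 := by
            simp [Nat.succ_max_succ]
          rw [hm]
          simp only [List.length_cons, Nat.succ_sub_succ, List.cons_append, List.zip_cons_cons,
            List.map_cons]
          rw [mRec]
          congr 1
          exact ih ys

lemma alt_eq (row1 row2 : List (Option String)) :
    merge_headers_py_alt row1 row2 =
      ((ffRec "" (row1.map pvNorm)
          ++ List.replicate (max (row1.map pvNorm).length row2.length
              - (row1.map pvNorm).length) "").zip
        (row2.map pvNorm
          ++ List.replicate (max (row1.map pvNorm).length row2.length - row2.length) "")).map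
        (fun ab => pvCombine ab.1 ab.2) := by
  have hcomb : (fun ab : String × String => bCombine ab.1 ab.2)
      = fun ab : String × String => pvCombine ab.1 ab.2 := funext fun ab => combine_eq _ _
  simp only [merge_headers_py_alt, hcomb]
  congr 2
  -- the filled row1 equals ffRec "" vals
  rw [marksP_eq (row1.map pvNorm) 0]
  simp only [zero_add]
  set vals := row1.map pvNorm with hvals
  set ms := marksN vals with hms
  have hmatch : (match ms.map (fun k : Nat => (k : Int)) with
      | [] => (vals.length : Int) | p :: _ => p).toNat = ms.headD vals.length := by
    cases ms <;> simp
  rw [hmatch, PySem.List.slice_from_one, PySem.List.foldl_append_eq_flatMap]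
  have htail : (ms.map (fun k : Nat => (k : Int))).tail ++ [(vals.length : Int)]
      = (ms.tail ++ [vals.length]).map (fun k : Nat => (k : Int)) := by
    simp [List.map_tail]
  rw [htail, List.zip_map, List.flatMap_map]
  have hfun : (fun a : Nat × Nat =>
      List.replicate ((Prod.map (fun k : Nat => (k : Int)) (fun k : Nat => (k : Int)) a).2
          - (Prod.map (fun k : Nat => (k : Int)) (fun k : Nat => (k : Int)) a).1).toNat
        (PySem.List.pyGetD vals
          (Prod.map (fun k : Nat => (k : Int)) (fun k : Nat => (k : Int)) a).1 ""))
      = fun pq : Nat × Nat => List.replicate (pq.2 - pq.1) (vals.getD pq.1 "") := by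
    funext pq
    simp [Prod.map]
  rw [hfun]
  rw [show ms.tail = ms.drop 1 from List.drop_one.symm]
  rw [show List.replicate (ms.headD vals.length) ("" : String)
      ++ (ms.zip (ms.drop 1 ++ [vals.length])).flatMap
          (fun pq => List.replicate (pq.2 - pq.1) (vals.getD pq.1 ""))
      = ffRec "" vals from fillG vals ""]

-- ===== VERDICT (by name: the statement is the Claim_ definition above) =====
theorem merge_headers_py_spec : Claim_equal_merge_headers_py := by
  intro row1 row2 _
  show merge_headers_py row1 row2 = merge_headers_py_alt row1 row2
  unfold merge_headers_py
  rw [PySem.List.foldl_append_singleton_eq_map]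
  simp only [List.nil_append]
  rw [mRec_eq_map_range, fill_forward_eq, alt_eq]
  have hlen : (row1.map pvNorm).length = (ffRec "" (row1.map pvNorm)).length :=
    (length_ffRec (row1.map pvNorm) "").symm
  rw [hlen, show row2.length = (row2.map pvNorm).length from (List.length_map ..).symm,
    zipPad]
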